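-- pv_equiv track=rewrite | github.com/lingpri/hackerrank_prep | indexproduct.py | get_left_and_right_stack
-- ===== SOURCE A (Python) =====
-- def split_array(n, index):
--     left_array, right_array = [],[]
--     left_array = n[0:index]
--     right_array = n[index+1:len(n)]
--     return left_array,right_array
--
-- def get_left_closest_max_value(array, element):
--     for index, item in reversed(list(enumerate(array))):
--         if (item > element):
--             return index + 1
--     return 0
--
-- def get_right_closest_max_value(array, element,offset):
--     for index, item in enumerate(array):
--         if (item > element):
--             return index + offset + 2
--     return 0
--
-- def get_left_and_right_stack(randarr):
--     leftstack = []
--     rightstack = []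
--     for i,item in enumerate(randarr):
--         left_array, right_array = split_array(randarr,i)
--         leftpos = get_left_closest_max_value(left_array, item)
--         rightpos = get_right_closest_max_value(right_array,item,len(left_array))
--         leftstack.append(leftpos)
--         rightstack.append(rightpos)
--     return leftstack,rightstack
-- ===== SOURCE B (Python) =====
-- def get_left_and_right_stack(randarr):
--     def nearest_greater_left(arr):
--         res = []
--         stack = []  # (index, value) pairs; values strictly decreasing bottom-to-top
--         for i, x in enumerate(arr):
--             while stack and stack[-1][1] <= x:
--                 stack.pop()
--             res.append(stack[-1][0] + 1 if stack else 0)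
--             stack.append((i, x))
--         return res
--     n = len(randarr)
--     left = nearest_greater_left(randarr)
--     rev = nearest_greater_left(randarr[::-1])
--     right = [0 if p == 0 else n + 1 - p for p in reversed(rev)]
--     return left, right
-- ===== Notes on version B (the rewrite author's own statement) =====
-- stated objective: faster
-- what changed: Replaces the per-index linear scans over slices with a monotonic-stack single pass per direction (the right side obtained by running the same stack pass on the reversed array and remapping positions), O(n) instead of O(n^2).
import Mathlib
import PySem

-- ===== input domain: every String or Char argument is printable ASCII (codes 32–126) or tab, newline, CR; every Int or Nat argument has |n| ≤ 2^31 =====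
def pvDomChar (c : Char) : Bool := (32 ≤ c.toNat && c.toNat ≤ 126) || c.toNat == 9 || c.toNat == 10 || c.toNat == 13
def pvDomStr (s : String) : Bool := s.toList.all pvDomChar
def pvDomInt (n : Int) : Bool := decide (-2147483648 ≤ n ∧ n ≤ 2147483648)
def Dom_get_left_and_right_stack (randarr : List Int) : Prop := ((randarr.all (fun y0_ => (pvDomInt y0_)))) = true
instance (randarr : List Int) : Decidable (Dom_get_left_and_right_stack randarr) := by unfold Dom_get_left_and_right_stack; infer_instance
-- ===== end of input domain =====

-- B replaces A's quadratic per-index slice scans by one monotonic-stack pass per direction (objective: faster, asymptotic).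

-- ===== PORT A =====
def split_array (n : List Int) (index : Int) : List Int × List Int :=
  (PySem.List.slice n (some 0) (some index),
   PySem.List.slice n (some (index + 1)) (some (n.length : Int)))

def glcmLoop (l : List (Int × Int)) (element : Int) : Int :=
  match l with
  | [] => 0
  | (idx, item) :: rest => if item > element then idx + 1 else glcmLoop rest element

def get_left_closest_max_value (array : List Int) (element : Int) : Int :=
  glcmLoop ((PySem.List.enumerate array 0).reverse) element

def grcmLoop (l : List (Int × Int)) (element : Int) (offset : Int) : Int :=
  match l with
  | [] => 0
  | (idx, item) :: rest => if item > element then idx + offset + 2 else grcmLoop rest element offset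

def get_right_closest_max_value (array : List Int) (element : Int) (offset : Int) : Int :=
  grcmLoop (PySem.List.enumerate array 0) element offset

def glarsLoop (randarr : List Int) (l : List (Int × Int)) (ls rs : List Int) : List Int × List Int :=
  match l with
  | [] => (ls, rs)
  | (i, item) :: rest =>
    let la_ra := split_array randarr i
    let leftpos := get_left_closest_max_value la_ra.1 item
    let rightpos := get_right_closest_max_value la_ra.2 item (la_ra.1.length : Int)
    glarsLoop randarr rest (ls ++ [leftpos]) (rs ++ [rightpos])

def get_left_and_right_stack (randarr : List Int) : List Int × List Int :=
  glarsLoop randarr (PySem.List.enumerate randarr 0) [] []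

-- ===== PORT B =====
-- the while-pop loop of Source B
def nglPop (x : Int) : List (Int × Int) → List (Int × Int)
  | [] => []
  | (j, v) :: rest => if v ≤ x then nglPop x rest else (j, v) :: rest

-- 'stack[-1][0] + 1 if stack else 0'
def nglAns : List (Int × Int) → Int
  | [] => 0
  | (j, _) :: _ => j + 1

def nglLoop (l : List (Int × Int)) (stack : List (Int × Int)) (res : List Int) : List Int :=
  match l with
  | [] => res
  | (i, x) :: rest =>
    let s := nglPop x stack
    nglLoop rest ((i, x) :: s) (res ++ [nglAns s])

def nearest_greater_left (arr : List Int) : List Int :=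
  nglLoop (PySem.List.enumerate arr 0) [] []

def get_left_and_right_stack_alt (randarr : List Int) : List Int × List Int :=
  let n : Int := randarr.length
  let left := nearest_greater_left randarr
  let rev := nearest_greater_left randarr.reverse
  let right := rev.reverse.map (fun p => if p = 0 then 0 else n + 1 - p)
  (left, right)

-- ===== PRECONDITION & SPEC =====
def Spec_get_left_and_right_stack (randarr : List Int) (out : List Int × List Int) : Prop := out = get_left_and_right_stack_alt randarr
instance (randarr : List Int) (out : List Int × List Int) : Decidable (Spec_get_left_and_right_stack randarr out) := by unfold Spec_get_left_and_right_stack; infer_instance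

-- ===== CLAIM (what is proved, stated in full; the proofs are below) =====
def Claim_equal_get_left_and_right_stack : Prop := ∀ (randarr : List Int), Dom_get_left_and_right_stack randarr → Spec_get_left_and_right_stack randarr (get_left_and_right_stack randarr)

-- ===== LEMMAS AND PROOFS =====

-- A's per-index left and right value lists
def aLeftList (arr : List Int) : List Int :=
  (PySem.List.enumerate arr 0).map
    (fun p => get_left_closest_max_value (PySem.List.slice arr (some 0) (some p.1)) p.2)

def aRightList (arr : List Int) : List Int :=
  (PySem.List.enumerate arr 0).map
    (fun p => get_right_closest_max_value (PySem.List.slice arr (some (p.1 + 1)) (some arr.length)) p.2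
      ((PySem.List.slice arr (some 0) (some p.1)).length : Int))

lemma glarsLoop_eq (randarr : List Int) (l : List (Int × Int)) (ls rs : List Int) :
    glarsLoop randarr l ls rs =
      (ls ++ l.map (fun p => get_left_closest_max_value (PySem.List.slice randarr (some 0) (some p.1)) p.2),
       rs ++ l.map (fun p => get_right_closest_max_value (PySem.List.slice randarr (some (p.1 + 1)) (some randarr.length)) p.2
          ((PySem.List.slice randarr (some 0) (some p.1)).length : Int))) := by
  induction l generalizing ls rs with
  | nil => simp [glarsLoop]
  | cons p rest ih =>
    obtain ⟨i, item⟩ := p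
    simp [glarsLoop, split_array, ih]

lemma a_eq (arr : List Int) : get_left_and_right_stack arr = (aLeftList arr, aRightList arr) := by
  simp [get_left_and_right_stack, glarsLoop_eq, aLeftList, aRightList]

-- pushing one element onto the stack, as Source B does
def nglPush (s : List (Int × Int)) (p : Int × Int) : List (Int × Int) :=
  (p.1, p.2) :: nglPop p.2 s

-- output stream of B's loop
def nglOut (l : List (Int × Int)) (s : List (Int × Int)) : List Int :=
  match l with
  | [] => []
  | (i, x) :: rest => nglAns (nglPop x s) :: nglOut rest ((i, x) :: nglPop x s)

lemma nglLoop_eq (l : List (Int × Int)) (s : List (Int × Int)) (res : List Int) :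
    nglLoop l s res = res ++ nglOut l s := by
  induction l generalizing s res with
  | nil => simp [nglLoop, nglOut]
  | cons p rest ih =>
    obtain ⟨i, x⟩ := p
    simp [nglLoop, nglOut, ih]

lemma nglOut_append (l₁ l₂ : List (Int × Int)) (s : List (Int × Int)) :
    nglOut (l₁ ++ l₂) s = nglOut l₁ s ++ nglOut l₂ (l₁.foldl nglPush s) := by
  induction l₁ generalizing s with
  | nil => simp [nglOut]
  | cons p rest ih =>
    obtain ⟨i, x⟩ := p
    simp [nglOut, ih, nglPush]

-- A's left scan with an explicit default
def glcmD (l : List (Int × Int)) (x d : Int) : Int :=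
  match l with
  | [] => d
  | (idx, item) :: rest => if item > x then idx + 1 else glcmD rest x d

lemma glcmD_zero (l : List (Int × Int)) (x : Int) : glcmD l x 0 = glcmLoop l x := by
  induction l with
  | nil => rfl
  | cons p rest ih => obtain ⟨i, v⟩ := p; simp [glcmD, glcmLoop, ih]

lemma glcmD_append_single (l : List (Int × Int)) (k y x d : Int) :
    glcmD (l ++ [(k, y)]) x d = glcmD l x (if y > x then k + 1 else d) := by
  induction l with
  | nil => simp [glcmD]
  | cons p rest ih => obtain ⟨i, v⟩ := p; simp [glcmD, ih]

lemma nglPop_nglPop (x y : Int) (s : List (Int × Int)) (h : y ≤ x) :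
    nglPop x (nglPop y s) = nglPop x s := by
  induction s with
  | nil => rfl
  | cons p rest ih =>
    obtain ⟨j, v⟩ := p
    by_cases hv : v ≤ y
    · simp [nglPop, hv, le_trans hv h, ih]
    · simp [nglPop, hv]

-- core: the stack answer after folding l equals A's reversed scan of l
lemma stack_scan (l : List (Int × Int)) (x : Int) (s : List (Int × Int)) :
    nglAns (nglPop x (l.foldl nglPush s)) = glcmD l.reverse x (nglAns (nglPop x s)) := by
  induction l generalizing s with
  | nil => simp [glcmD]
  | cons p rest ih =>
    obtain ⟨k, y⟩ := p
    have step : nglAns (nglPop x (nglPush s (k, y))) = if y > x then k + 1 else nglAns (nglPop x s) := by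
      by_cases h : y ≤ x
      · have : ¬ (y > x) := by omega
        simp [nglPush, nglPop, h, this, nglPop_nglPop x y s h]
      · have : y > x := by omega
        simp [nglPush, nglPop, h, this, nglAns]
    simp only [List.foldl_cons, List.reverse_cons, ih, glcmD_append_single, step]

-- main left lemma: B's stream over the enumeration equals A's per-prefix scans
lemma nglOut_eq_aLeftList (arr : List Int) :
    nglOut (PySem.List.enumerate arr 0) [] = aLeftList arr := by
  induction arr using List.reverseRecOn with
  | nil => simp [nglOut, aLeftList]
  | append_singleton xs y ih =>
    have henum : PySem.List.enumerate (xs ++ [y]) 0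
        = PySem.List.enumerate xs 0 ++ [((xs.length : Int), y)] := by
      simp [PySem.List.enumerate_append, PySem.List.enumerate_cons]
    rw [aLeftList, henum, nglOut_append, List.map_append, ih]
    congr 1
    · -- the old prefix entries are unchanged by appending y
      unfold aLeftList
      apply List.map_congr_left
      intro p hp
      obtain ⟨k, hk, rfl⟩ := (PySem.List.mem_enumerate_iff _ _ _).1 hp
      simp only [zero_add]
      have hsl : PySem.List.slice (xs ++ [y]) (some 0) (some ((k : Nat) : Int))
          = PySem.List.slice xs (some 0) (some ((k : Nat) : Int)) := by
        simp [PySem.List.slice_to_natCast, List.take_append_of_le_length (le_of_lt hk)]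
      rw [hsl]
    · -- the new last entry
      simp only [nglOut]
      rw [stack_scan]
      have h0 : nglAns (nglPop y ([] : List (Int × Int))) = 0 := rfl
      rw [h0, glcmD_zero]
      have hsl2 : PySem.List.slice (xs ++ [y]) (some 0) (some (xs.length : Int)) = xs := by
        simp [PySem.List.slice_to_natCast]
      simp only [List.map_cons, List.map_nil, hsl2]
      rfl

-- right-hand core: the forward right scan equals the reversed left scan, remapped
lemma right_scan (D : List Int) (x : Int) (s off : Int) :
    grcmLoop (PySem.List.enumerate D s) x off =
      (if glcmLoop ((PySem.List.enumerate D.reverse 0).reverse) x = 0 then 0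
       else off + s + (D.length : Int) + 2 - glcmLoop ((PySem.List.enumerate D.reverse 0).reverse) x) := by
  induction D generalizing s with
  | nil => simp [grcmLoop, glcmLoop]
  | cons d D' ih =>
    have henum : (PySem.List.enumerate (d :: D').reverse 0).reverse
        = ((D'.length : Int), d) :: (PySem.List.enumerate D'.reverse 0).reverse := by
      simp [PySem.List.enumerate_append, PySem.List.enumerate_cons]
    rw [henum]
    by_cases hd : d > x
    · have hne : ((D'.length : Int) + 1) ≠ 0 := by positivity
      simp only [PySem.List.enumerate_cons, grcmLoop, glcmLoop, if_pos hd, hne,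
        List.length_cons]
      push_cast
      ring
    · simp only [PySem.List.enumerate_cons, grcmLoop, glcmLoop, if_neg hd, ih (s + 1)]
      split_ifs with h
      · rfl
      · simp only [List.length_cons]
        push_cast
        ring

-- B's right list equals A's right list
lemma right_eq (arr : List Int) :
    aRightList arr =
      (nglOut (PySem.List.enumerate arr.reverse 0) []).reverse.map
        (fun p => if p = 0 then 0 else (arr.length : Int) + 1 - p) := by
  rw [nglOut_eq_aLeftList]
  apply List.ext_getElem
  · simp [aRightList, aLeftList, PySem.List.length_enumerate]
  intro k h1 h2
  have hk : k < arr.length := by simpa [aRightList, PySem.List.length_enumerate] using h1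
  have hlenL : (aLeftList arr.reverse).length = arr.length := by
    simp [aLeftList, PySem.List.length_enumerate]
  have hj : arr.length - 1 - k < arr.length := by omega
  rw [List.getElem_map, List.getElem_reverse]
  simp only [aRightList, List.getElem_map, PySem.List.getElem_enumerate]
  have hjlen : arr.length - 1 - k < (aLeftList arr.reverse).length := by omega
  have hgetL : (aLeftList arr.reverse)[arr.length - 1 - k] =
      get_left_closest_max_value
        (PySem.List.slice arr.reverse (some 0) (some ((arr.length - 1 - k : Nat) : Int)))
        (arr.reverse[arr.length - 1 - k]'(by simp; omega)) := by
    simp [aLeftList, PySem.List.getElem_enumerate]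
  have hrevval : arr.reverse[arr.length - 1 - k]'(by simp; omega) = arr[k] := by
    rw [List.getElem_reverse]
    congr 1
    omega
  have hrevtake : PySem.List.slice arr.reverse (some 0) (some ((arr.length - 1 - k : Nat) : Int))
      = (arr.drop (k + 1)).reverse := by
    rw [PySem.List.slice_zero_start, PySem.List.slice_to_natCast]
    rw [List.take_reverse]
    congr 2
    omega
  -- reduce the left-hand side (A's right scan) to the drop (k+1) suffix
  have hsliceR : PySem.List.slice arr (some ((k : Int) + 1)) (some (arr.length : Int))
      = arr.drop (k + 1) := by
    have : ((k : Int) + 1) = ((k + 1 : Nat) : Int) := by push_cast; ring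
    rw [this, PySem.List.slice_natCast]
    apply List.take_of_length_le
    simp
  have hsliceL : (PySem.List.slice arr (some 0) (some ((k : Int)))).length = k := by
    rw [PySem.List.slice_zero_start, PySem.List.slice_to_natCast]
    simp
    omega
  simp only [hlenL, zero_add]
  rw [hgetL, hrevval, hrevtake, hsliceR, hsliceL]
  rw [get_right_closest_max_value, right_scan]
  rw [get_left_closest_max_value]
  have hlen : ((arr.drop (k + 1)).length : Int) = (arr.length : Int) - (k : Int) - 1 := by
    simp only [List.length_drop]
    omega
  split_ifs with h
  · rfl
  · rw [hlen]; ring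

-- ===== VERDICT (by name: the statement is the Claim_ definition above) =====
theorem get_left_and_right_stack_spec : Claim_equal_get_left_and_right_stack := by
  intro arr _
  unfold Spec_get_left_and_right_stack
  rw [a_eq]
  show (aLeftList arr, aRightList arr) = get_left_and_right_stack_alt arr
  unfold get_left_and_right_stack_alt nearest_greater_left
  simp only [nglLoop_eq, List.nil_append]
  rw [right_eq, nglOut_eq_aLeftList arr]
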